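-- pv_equiv track=rewrite | github.com/kazuma104/AOJ | ALDS1/1_4_A.py | linearSearch2
-- ===== SOURCE A (Python) =====
-- from collections import deque
--
-- def linearSearch2(n, S, q, T): #dequeを使用して，若干早いはず
--     count = 0
--     d = deque(T)
--     for _ in range(q):
--         t = d.pop()
--         for s in range(n):
--             if t==S[s]:
--                 count += 1
--                 break
--     return count
-- ===== SOURCE B (Python) =====
-- import bisect
--
-- def linearSearch2(n, S, q, T):
--     # one-time sort of the searched prefix, then binary search per query
--     Ss = sorted(S[:max(n, 0)])
--     count = 0
--     for t in (T[len(T) - q:] if q > 0 else []):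
--         i = bisect.bisect_left(Ss, t)
--         if i < len(Ss) and Ss[i] == t:
--             count += 1
--     return count
-- ===== Notes on version B (the rewrite author's own statement) =====
-- stated objective: faster
-- what changed: Replaced the per-query linear scan of S by a one-time sort of the searched prefix plus a binary search (bisect_left) per query.
import Mathlib
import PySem

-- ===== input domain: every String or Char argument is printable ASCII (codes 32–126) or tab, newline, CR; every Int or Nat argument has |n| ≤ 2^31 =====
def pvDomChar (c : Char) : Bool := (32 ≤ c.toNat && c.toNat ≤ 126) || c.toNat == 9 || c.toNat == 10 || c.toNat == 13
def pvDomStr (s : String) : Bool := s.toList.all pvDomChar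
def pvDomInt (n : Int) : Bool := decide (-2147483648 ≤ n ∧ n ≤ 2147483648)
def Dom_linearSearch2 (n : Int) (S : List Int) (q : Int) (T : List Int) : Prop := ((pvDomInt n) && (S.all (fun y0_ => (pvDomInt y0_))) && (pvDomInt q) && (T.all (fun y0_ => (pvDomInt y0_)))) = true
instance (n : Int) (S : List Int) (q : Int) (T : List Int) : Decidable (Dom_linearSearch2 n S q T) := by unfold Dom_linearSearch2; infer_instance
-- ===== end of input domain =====

-- B replaces A's per-query linear scan of S with a one-time sort of the searched
-- prefix plus a binary search (bisect_left) per query: O((n+q) log n) vs O(q*n).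

-- ===== PORT A =====
-- inner 'for s in range(n): if t == S[s]: count += 1; break'
def lsScan (S : List Int) (t : Int) (count : Int) : List Int → Int
  | [] => count
  | s :: rest =>
    match PySem.List.pyGet? S s with
    | none => count            -- IndexError in Python; excluded by Pre_
    | some v => if t = v then count + 1 else lsScan S t count rest

-- outer 'for _ in range(q): t = d.pop(); …' (deque pop from the right)
def lsLoop (n : Int) (S : List Int) : Nat → List Int → Int → Int
  | 0, _, count => count
  | k+1, d, count =>
    match d.getLast? with
    | none => count            -- IndexError in Python (pop from empty deque); excluded by Pre_
    | some t => lsLoop n S k d.dropLast (lsScan S t count (PySem.List.pyRange 0 n 1))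

def linearSearch2 (n : Int) (S : List Int) (q : Int) (T : List Int) : Int :=
  lsLoop n S q.toNat T 0

-- ===== PORT B =====
-- 'for t in …: i = bisect_left(Ss, t); if i < len(Ss) and Ss[i] == t: count += 1'
def bisectCount (Ss : List Int) : List Int → Int → Int
  | [], count => count
  | t :: rest, count =>
    let i := PySem.List.bisectLeft Ss t
    bisectCount Ss rest (if i < Ss.length ∧ Ss[i]? = some t then count + 1 else count)

def linearSearch2_alt (n : Int) (S : List Int) (q : Int) (T : List Int) : Int :=
  let Ss := PySem.List.sorted (PySem.List.slice S none (some (max n 0))) (fun x => x)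
  bisectCount Ss (if q > 0 then PySem.List.slice T (some ((T.length : Int) - q)) none else []) 0

-- ===== PRECONDITION & SPEC =====
-- Pre_ excludes exactly the inputs where A raises IndexError: more pops than T holds
-- (q > len(T)), or n > len(S) while some popped query element is absent from S
-- (the inner scan then indexes past the end of S).
def Pre_linearSearch2 (n : Int) (S : List Int) (q : Int) (T : List Int) : Prop :=
  q ≤ (T.length : Int) ∧
    (n ≤ (S.length : Int) ∨ q ≤ 0 ∨ ∀ t ∈ T.drop (T.length - q.toNat), t ∈ S)
instance (n : Int) (S : List Int) (q : Int) (T : List Int) : Decidable (Pre_linearSearch2 n S q T) := by unfold Pre_linearSearch2; infer_instance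

def pvWitness_linearSearch2 : Int × List Int × Int × List Int := (1, [2], 1, [2])

def Spec_linearSearch2 (n : Int) (S : List Int) (q : Int) (T : List Int) (out : Int) : Prop := out = linearSearch2_alt n S q T
instance (n : Int) (S : List Int) (q : Int) (T : List Int) (out : Int) : Decidable (Spec_linearSearch2 n S q T out) := by unfold Spec_linearSearch2; infer_instance

-- ===== CLAIM (what is proved, stated in full; the proofs are below) =====
def Claim_equal_linearSearch2 : Prop := ∀ (n : Int) (S : List Int) (q : Int) (T : List Int), Dom_linearSearch2 n S q T → Pre_linearSearch2 n S q T → Spec_linearSearch2 n S q T (linearSearch2 n S q T)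
-- ===== LEMMAS AND PROOFS =====

-- A's inner scan: one tick iff t occurs in the first n slots of S
theorem lsScan_eq (S : List Int) (t : Int) :
    ∀ (k j : Nat) (c : Int), (k + j ≤ S.length ∨ t ∈ S.drop j) →
      lsScan S t c ((List.range k).map (fun i => ((i + j : Nat) : Int)))
        = if t ∈ (S.drop j).take k then c + 1 else c := by
  intro k
  induction k with
  | zero => intro j c _; simp [lsScan]
  | succ k ih =>
    intro j c h
    have hmap : (List.range (k+1)).map (fun i => ((i + j : Nat) : Int))
        = ((j : Nat) : Int) :: (List.range k).map (fun i => ((i + (j+1) : Nat) : Int)) := by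
      rw [List.range_succ_eq_map, List.map_cons, List.map_map]
      refine congrArg₂ List.cons (by simp) ?_
      apply List.map_congr_left
      intro i _
      simp only [Function.comp]
      omega
    rw [hmap]
    by_cases hj : j < S.length
    · have hget : PySem.List.pyGet? S ((j : Nat) : Int) = some S[j] := by
        rw [PySem.List.pyGet?_natCast, List.getElem?_eq_getElem hj]
      have hdrop : S.drop j = S[j] :: S.drop (j + 1) := List.drop_eq_getElem_cons hj
      simp only [lsScan, hget]
      by_cases ht : t = S[j]
      · rw [if_pos ht, hdrop, List.take_succ_cons, if_pos (by simp [ht])]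
      · rw [if_neg ht]
        have hside : k + (j+1) ≤ S.length ∨ t ∈ S.drop (j+1) := by
          rcases h with h | h
          · left; omega
          · right
            rw [hdrop] at h
            rcases List.mem_cons.mp h with h | h
            · exact absurd h ht
            · exact h
        rw [ih (j+1) c hside, hdrop, List.take_succ_cons]
        simp [List.mem_cons, ht]
    · have hnone : PySem.List.pyGet? S ((j : Nat) : Int) = none := by
        rw [PySem.List.pyGet?_natCast]
        exact List.getElem?_eq_none (Nat.le_of_not_lt hj)
      have hdrop : S.drop j = [] := List.drop_eq_nil_of_le (Nat.le_of_not_lt hj)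
      simp [lsScan, hnone, hdrop]

theorem lsScan_range (S : List Int) (t : Int) (n : Int) (c : Int)
    (h : n ≤ (S.length : Int) ∨ t ∈ S) :
    lsScan S t c (PySem.List.pyRange 0 n 1)
      = if t ∈ S.take n.toNat then c + 1 else c := by
  by_cases hn : n ≤ 0
  · have h1 : PySem.List.pyRange 0 n 1 = [] := by
      rw [PySem.List.pyRange_of_pos 0 n (by omega), if_neg (by omega)]
      simp
    have h2 : n.toNat = 0 := by omega
    simp [h1, h2, lsScan]
  · have hr : PySem.List.pyRange 0 n 1 = (List.range n.toNat).map (fun k => ((k : Nat) : Int)) := by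
      conv_lhs => rw [show n = ((n.toNat : Nat) : Int) by omega]
      exact PySem.List.pyRange_zero_natCast n.toNat
    rw [hr]
    have := lsScan_eq S t n.toNat 0 c (by
      rcases h with h | h
      · left; omega
      · right; simpa using h)
    simpa using this

-- A's outer loop: count, over the k popped (last) elements of d, those present in S.take n.toNat
theorem lsLoop_eq (n : Int) (S : List Int) :
    ∀ (k : Nat) (d : List Int) (c : Int), k ≤ d.length →
      (n ≤ (S.length : Int) ∨ ∀ t ∈ d.drop (d.length - k), t ∈ S) →
      lsLoop n S k d c
        = c + ((d.drop (d.length - k)).countP (fun t => decide (t ∈ S.take n.toNat)) : Int) := by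
  intro k
  induction k with
  | zero => intro d c _ _; simp [lsLoop]
  | succ k ih =>
    intro d c hk h
    have hd : d ≠ [] := by intro h'; subst h'; simp at hk
    have hlast : d.getLast? = some (d.getLast hd) := List.getLast?_eq_some_getLast hd
    have hlen : d.dropLast.length = d.length - 1 := by simp
    have hsplit : d.dropLast ++ [d.getLast hd] = d := List.dropLast_append_getLast hd
    obtain ⟨m, hm'⟩ : ∃ m, d.length - (k+1) = m := ⟨_, rfl⟩
    have hdropd : d.drop m = d.dropLast.drop m ++ [d.getLast hd] := by
      conv_lhs => rw [← hsplit]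
      rw [List.drop_append_of_le_length (by omega)]
    have hmem : d.getLast hd ∈ d.drop (d.length - (k+1)) := by rw [hm', hdropd]; simp
    have hscan : lsScan S (d.getLast hd) c (PySem.List.pyRange 0 n 1)
        = if d.getLast hd ∈ S.take n.toNat then c + 1 else c :=
      lsScan_range S (d.getLast hd) n c (by
        rcases h with h | h
        · left; exact h
        · right; exact h _ hmem)
    have hm : d.dropLast.length - k = m := by omega
    have hside : n ≤ (S.length : Int) ∨
        ∀ t ∈ d.dropLast.drop (d.dropLast.length - k), t ∈ S := by
      rcases h with h | h
      · left; exact h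
      · right; intro t htm
        apply h
        rw [hm', hdropd]
        rw [hm] at htm
        exact List.mem_append_left _ htm
    simp only [lsLoop, hlast]
    rw [hscan, ih d.dropLast _ (by omega) hside, hm, hm', hdropd, List.countP_append]
    by_cases hp : d.getLast hd ∈ S.take n.toNat
    · rw [if_pos hp]
      have h1 : List.countP (fun t => decide (t ∈ S.take n.toNat)) [d.getLast hd] = 1 := by
        simp [hp]
      rw [h1]
      push_cast
      ring
    · rw [if_neg hp]
      have h0 : List.countP (fun t => decide (t ∈ S.take n.toNat)) [d.getLast hd] = 0 := by
        simp [hp]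
      rw [h0]
      simp

-- bisect_left check on a sorted list decides membership
theorem bisect_mem (Ss : List Int) (hs : Ss.Pairwise (fun a b => a ≤ b)) (t : Int) :
    (PySem.List.bisectLeft Ss t < Ss.length ∧ Ss[PySem.List.bisectLeft Ss t]? = some t)
      ↔ t ∈ Ss := by
  obtain ⟨h1, h2, h3⟩ := PySem.List.bisectLeft_spec Ss t hs
  constructor
  · rintro ⟨hi, hget⟩
    exact List.mem_of_getElem? hget
  · intro htm
    obtain ⟨j, hj, hjt⟩ := List.mem_iff_getElem.mp htm
    have hij : PySem.List.bisectLeft Ss t ≤ j := by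
      by_contra hlt
      have := h2 j hj (by omega)
      omega
    have hilen : PySem.List.bisectLeft Ss t < Ss.length := by omega
    have hts : t ≤ Ss[PySem.List.bisectLeft Ss t] := h3 _ hilen (le_refl _)
    have hsi : Ss[PySem.List.bisectLeft Ss t] ≤ Ss[j] := by
      rcases Nat.eq_or_lt_of_le hij with he | hl
      · simp [he]
      · exact (List.pairwise_iff_getElem.mp hs) _ _ hilen hj hl
    have heq : Ss[PySem.List.bisectLeft Ss t] = t := le_antisymm (hjt ▸ hsi) hts
    exact ⟨hilen, by rw [List.getElem?_eq_getElem hilen, heq]⟩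

-- B's loop: counts the elements of L present in the sorted list Ss
theorem bisectCount_eq (Ss : List Int) (hs : Ss.Pairwise (fun a b => a ≤ b)) :
    ∀ (L : List Int) (c : Int),
      bisectCount Ss L c = c + (L.countP (fun t => decide (t ∈ Ss)) : Int) := by
  intro L
  induction L with
  | nil => intro c; simp [bisectCount]
  | cons t rest ih =>
    intro c
    simp only [bisectCount]
    rw [ih, List.countP_cons]
    by_cases hm : t ∈ Ss
    · rw [if_pos ((bisect_mem Ss hs t).mpr hm)]
      have h1 : (if (fun t => decide (t ∈ Ss)) t = true then 1 else 0) = 1 := by simp [hm]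
      rw [h1]
      push_cast
      ring
    · rw [if_neg (fun hc => hm ((bisect_mem Ss hs t).mp hc))]
      have h0 : (if (fun t => decide (t ∈ Ss)) t = true then 1 else 0) = 0 := by simp [hm]
      rw [h0]
      simp

-- ===== VERDICT (by name: the statement is the Claim_ definition above) =====
theorem linearSearch2_spec : Claim_equal_linearSearch2 := by
  unfold Claim_equal_linearSearch2
  intro n S q T _ hpre
  obtain ⟨hq, hside⟩ := hpre
  unfold Spec_linearSearch2 linearSearch2 linearSearch2_alt
  have hqT : q.toNat ≤ T.length := by omega
  -- the A side
  have hA : lsLoop n S q.toNat T 0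
      = 0 + ((T.drop (T.length - q.toNat)).countP
          (fun t => decide (t ∈ S.take n.toNat)) : Int) := by
    apply lsLoop_eq n S q.toNat T 0 hqT
    rcases hside with h | h | h
    · left; exact h
    · right
      have : T.length - q.toNat = T.length := by omega
      rw [this, List.drop_length]
      intro t htm
      simp at htm
    · right; exact h
  rw [hA]
  -- the B side
  have hPrefix : PySem.List.slice S none (some (max n 0)) = S.take n.toNat := by
    rw [PySem.List.slice_to S (le_max_right n 0)]
    congr 1
    omega
  have hTail : (if q > 0 then PySem.List.slice T (some ((T.length : Int) - q)) none else [])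
      = T.drop (T.length - q.toNat) := by
    by_cases hq0 : q > 0
    · rw [if_pos hq0, PySem.List.slice_from T (by omega)]
      congr 1
      omega
    · rw [if_neg hq0]
      have : T.length - q.toNat = T.length := by omega
      rw [this, List.drop_length]
  rw [hPrefix, hTail]
  have hpair : (PySem.List.sorted (S.take n.toNat) (fun x => x)).Pairwise (fun a b => a ≤ b) := by
    simpa using PySem.List.sorted_pairwise (S.take n.toNat) (fun x => x)
  rw [bisectCount_eq _ hpair]
  have hcnt : List.countP (fun t => decide (t ∈ List.take n.toNat S)) (T.drop (T.length - q.toNat))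
      = List.countP (fun t => decide (t ∈ PySem.List.sorted (List.take n.toNat S) fun x => x))
          (T.drop (T.length - q.toNat)) := by
    apply List.countP_congr
    intro t _
    simp [PySem.List.mem_sorted]
  rw [hcnt]
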